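-- pv_equiv track=rewrite | github.com/StronBerry/Public_QAP175 | 19_10_2(username_lists)addon.py | combine_user_data
-- ===== SOURCE A (Python) =====
-- from typing import List, Dict, Any, Set, Tuple
--
-- def combine_user_data(users: List[Dict[str, Any]]) -> Dict[str, Tuple[Any, ...]]:
--     combined_data = {}
--     for user in users:
--         for key, value in user.items():
--             if key in combined_data:
--                 combined_data[key].append(value)
--             else:
--                 combined_data[key] = [value]
--     # Преобразуем списки значений в кортежи
--     for key in combined_data:
--         combined_data[key] = tuple(combined_data[key])
--     return combined_data
-- ===== SOURCE B (Python) =====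
-- def combine_user_data(users):
--     # Index first: distinct keys in first-appearance order, then one rescan per key.
--     ordered_keys = {}
--     for user in users:
--         for key in user:
--             ordered_keys[key] = None
--     return {k: tuple(u[k] for u in users if k in u) for k in ordered_keys}
-- ===== Notes on version B (the rewrite author's own statement) =====
-- stated objective: alternative
-- what changed: Replaces the single grouping pass that appends into per-key lists (then converts each to a tuple) by an index-then-scan shape: first collect the distinct keys in first-appearance order, then build each key's tuple directly with a rescan of the users list per key.
import Mathlib
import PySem

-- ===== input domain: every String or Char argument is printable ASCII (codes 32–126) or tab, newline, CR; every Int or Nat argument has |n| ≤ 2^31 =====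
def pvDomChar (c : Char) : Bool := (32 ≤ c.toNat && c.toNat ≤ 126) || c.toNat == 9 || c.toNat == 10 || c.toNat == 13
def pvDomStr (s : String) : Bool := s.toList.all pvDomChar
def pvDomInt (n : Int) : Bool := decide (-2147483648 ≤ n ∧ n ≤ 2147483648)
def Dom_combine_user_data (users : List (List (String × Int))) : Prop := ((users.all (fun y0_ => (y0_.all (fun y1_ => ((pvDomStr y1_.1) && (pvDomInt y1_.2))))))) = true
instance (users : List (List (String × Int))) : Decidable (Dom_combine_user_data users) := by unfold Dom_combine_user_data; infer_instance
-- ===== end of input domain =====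

-- B builds each key's value tuple by a per-key rescan of the users, instead of A's single
-- grouping pass that appends into per-key lists and converts them to tuples afterwards.

-- ===== PORT A =====
-- single grouping pass: append the value to the key's list, or start a new list; the final
-- tuple(list) loop is the identity under the List Int convention for tuples of ints
def combine_user_data (users : List (List (String × Int))) : List (String × List Int) :=
  (users.foldl (fun d user =>
    user.foldl (fun d kv =>
      if d.contains kv.1 then d.modify kv.1 [] (fun vs => vs ++ [kv.2])
      else d.insert kv.1 [kv.2]) d) PySem.Dict.empty).items.map (fun p => (p.1, p.2))

-- ===== PORT B =====
-- index first (distinct keys in first-appearance order), then one rescan of users per key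
def combine_user_data_alt (users : List (List (String × Int))) : List (String × List Int) :=
  (users.foldl (fun ks user =>
    user.foldl (fun ks kv => PySem.Set.add ks kv.1) ks) (PySem.Set.empty : PySem.Set String)).map
    (fun k => (k, users.filterMap (fun u => (PySem.Dict.mk u).get? k)))

-- ===== PRECONDITION & SPEC =====
-- Pre_ excludes association lists in which one user repeats a key: such a list is not the
-- image of any Python dict (the dict collapses the duplicate), so the Lean representation
-- is ambiguous there and the two ports read it differently.
def Pre_combine_user_data (users : List (List (String × Int))) : Prop :=
  ∀ u ∈ users, (u.map Prod.fst).Nodup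
instance (users : List (List (String × Int))) : Decidable (Pre_combine_user_data users) := by
  unfold Pre_combine_user_data; infer_instance
def pvWitness_combine_user_data : (List (List (String × Int))) :=
  [[("a", 1), ("b", 2)], [("a", 3)]]
def Spec_combine_user_data (users : List (List (String × Int))) (out : List (String × List Int)) : Prop := out = combine_user_data_alt users
instance (users : List (List (String × Int))) (out : List (String × List Int)) : Decidable (Spec_combine_user_data users out) := by unfold Spec_combine_user_data; infer_instance

-- ===== CLAIM (what is proved, stated in full; the proofs are below) =====
def Claim_equal_combine_user_data : Prop := ∀ (users : List (List (String × Int))), Dom_combine_user_data users → Pre_combine_user_data users → Spec_combine_user_data users (combine_user_data users)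

-- ===== LEMMAS AND PROOFS =====

-- A's loop body is exactly the modify-with-default step, in both branches
theorem pv_step_eq (d : PySem.Dict String (List Int)) (kv : String × Int) :
    (if d.contains kv.1 then d.modify kv.1 [] (fun vs => vs ++ [kv.2])
     else d.insert kv.1 [kv.2]) = d.modify kv.1 [] (fun vs => vs ++ [kv.2]) := by
  by_cases h : d.contains kv.1
  · simp [h]
  · simp [h, PySem.Dict.modify, PySem.Dict.getD_of_not_contains]

-- one user with unique keys: the values its pairs contribute for key k are the dict lookup
theorem pv_per_user (u : List (String × Int)) (h : (u.map Prod.fst).Nodup) (k : String) :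
    (List.map (fun x => x.2) (List.filter (fun p => p.1 == k) u))
      = ((PySem.Dict.mk u).get? k).toList := by
  induction u with
  | nil => simp [PySem.Dict.get?]
  | cons a t ih =>
    simp only [List.map_cons, List.nodup_cons] at h
    rw [PySem.Dict.get?_mk_cons]
    by_cases hk : a.1 = k
    · subst hk
      simp only [List.filter_cons, beq_self_eq_true, if_pos, List.map_cons, Option.toList_some]
      have : List.filter (fun p => p.1 == a.1) t = [] := by
        rw [List.filter_eq_nil_iff]; intro p hp
        simp only [beq_iff_eq]
        exact fun he => h.1 (he ▸ List.mem_map_of_mem hp)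
      simp [this]
    · have : (a.1 == k) = false := beq_eq_false_iff_ne.mpr hk
      simp [this, ih h.2]

-- B's per-key rescan equals the per-key filter of the flattened pair list
theorem pv_values_eq (users : List (List (String × Int)))
    (h : ∀ u ∈ users, (u.map Prod.fst).Nodup) (k : String) :
    users.filterMap (fun u => (PySem.Dict.mk u).get? k)
      = List.map (fun x => x.2) (List.filter (fun p => p.1 == k) users.flatten) := by
  induction users with
  | nil => simp
  | cons u us ih =>
    rw [List.filterMap_cons, List.flatten_cons, List.filter_append, List.map_append,
      pv_per_user u (h u (by simp)) k, ih (fun v hv => h v (by simp [hv]))]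
    cases (PySem.Dict.mk u).get? k <;> simp

-- ===== VERDICT (by name: the statement is the Claim_ definition above) =====
theorem combine_user_data_spec : Claim_equal_combine_user_data := by
  intro users _hdom hpre
  unfold Spec_combine_user_data combine_user_data combine_user_data_alt
  rw [show (fun (d : PySem.Dict String (List Int)) (kv : String × Int) =>
      if d.contains kv.1 then d.modify kv.1 [] (fun vs => vs ++ [kv.2])
      else d.insert kv.1 [kv.2]) = (fun d kv => d.modify kv.1 [] (fun vs => vs ++ [kv.2]))
    from funext fun d => funext fun kv => pv_step_eq d kv]
  simp only [← List.foldl_flatten]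
  have hnd : (users.flatten.foldl (fun d kv => d.modify kv.1 [] (fun vs => vs ++ [kv.2]))
      PySem.Dict.empty).keys.Nodup :=
    PySem.Dict.nodup_keys_foldl_modify_key users.flatten Prod.fst [] (fun d x vs => vs ++ [x.2])
      PySem.Dict.empty (by simp)
  rw [PySem.Dict.items_eq_map_keys _ hnd []]
  rw [PySem.Dict.keys_foldl_modify_key users.flatten Prod.fst [] (fun d x vs => vs ++ [x.2])
    PySem.Dict.empty]
  have hkeys : PySem.Set.update (PySem.Dict.empty : PySem.Dict String (List Int)).keys
      (users.flatten.map Prod.fst)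
      = users.flatten.foldl (fun ks kv => PySem.Set.add ks kv.1) PySem.Set.empty := by
    simp only [PySem.Set.update, PySem.Dict.keys_empty, List.foldl_map, PySem.Set.empty]
  rw [hkeys, List.map_map]
  refine List.map_congr_left ?_
  intro k _
  simp only [Function.comp]
  rw [PySem.Dict.getD_foldl_modify_append, pv_values_eq users hpre k]
  simp [PySem.Dict.getD_empty]
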